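-- pv_equiv track=rewrite | github.com/hscspring/The-DataStructure-and-Algorithms | BiSearch/get_closest_wall(AliInterview).py | get_distance_to_the_closet_wall2
-- ===== SOURCE A (Python) =====
-- def get_sub_distance(sub_s, is_start: bool, is_end: bool):
--     if is_start:
--         return list(range(len(sub_s), 0, -1))
--     elif is_end:
--         return list(range(1, len(sub_s)+1))
--     else:
--         mid = len(sub_s) // 2
--         left = list(range(1, mid+1))
--         right = list(reversed(left))
--         if len(sub_s) % 2 == 0:
--             return left + right
--         else:
--             return left + [mid+1] + right
--
-- def get_distance_to_the_closet_wall2(lst: list) -> list: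
--     if not lst:
--         return []
--     result = []
--     s = "".join(list(map(str, lst)))
--     parts = s.split("1")
--     length = len(parts)
--     if length == 1:
--         return lst
--     for i, part in enumerate(parts):
--         if i == 0:
--             sub = get_sub_distance(part, True, False)
--         elif i == length - 1:
--             sub = get_sub_distance(part, False, True)
--         else:
--             sub = get_sub_distance(part, False, False)
--         result.extend(sub)
--         result.append(0)
--     return result[:-1]
-- ===== SOURCE B (Python) =====
-- def get_distance_to_the_closet_wall2(lst: list) -> list:
--     # classic two-directional nearest-wall sweep over the joined digit string
--     s = "".join(map(str, lst))
--     if "1" not in s: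
--         return lst
--     n = len(s)
--     res = []
--     d = n  # sentinel: larger than any real distance
--     for c in s:
--         d = 0 if c == "1" else d + 1
--         res.append(d)
--     out = []
--     d = n
--     for c, r in zip(reversed(s), reversed(res)):
--         d = 0 if c == "1" else d + 1
--         out.append(min(d, r))
--     return list(reversed(out))
-- ===== Notes on version B (the rewrite author's own statement) =====
-- stated objective: alternative
-- what changed: Replaces A's split-the-string-on-'1'-and-synthesize-a-range-list-per-segment construction with the classic two-directional nearest-wall sweep (forward pass of running distances, backward pass taking the minimum) over the same joined digit string.
import Mathlib
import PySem

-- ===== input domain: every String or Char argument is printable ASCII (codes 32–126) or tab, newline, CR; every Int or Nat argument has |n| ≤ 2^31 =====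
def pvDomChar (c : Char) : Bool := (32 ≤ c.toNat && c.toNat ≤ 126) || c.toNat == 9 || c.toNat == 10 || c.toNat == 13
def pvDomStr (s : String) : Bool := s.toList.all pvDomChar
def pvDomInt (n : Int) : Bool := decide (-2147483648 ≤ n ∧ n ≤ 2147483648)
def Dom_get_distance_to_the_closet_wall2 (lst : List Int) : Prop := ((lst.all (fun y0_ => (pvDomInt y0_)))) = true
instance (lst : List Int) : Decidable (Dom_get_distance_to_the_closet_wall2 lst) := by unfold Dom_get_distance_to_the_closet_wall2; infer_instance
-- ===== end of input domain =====

-- B replaces A's split-into-segments-and-synthesize-ranges construction by the classic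
-- two-directional nearest-wall sweep over the same joined digit string (alternative algorithm, same cost).

-- ===== PORT A =====
def get_sub_distance (sub_s : List Char) (is_start : Bool) (is_end : Bool) : List Int :=
  if is_start then
    PySem.List.pyRange (sub_s.length : Int) 0 (-1)
  else if is_end then
    PySem.List.pyRange 1 ((sub_s.length : Int) + 1) 1
  else
    let mid : Int := PySem.Int.floordiv (sub_s.length : Int) 2
    let left := PySem.List.pyRange 1 (mid + 1) 1
    let right := left.reverse
    if PySem.Int.mod (sub_s.length : Int) 2 = 0 then left ++ right
    else left ++ [mid + 1] ++ right

def get_distance_to_the_closet_wall2 (lst : List Int) : List Int :=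
  if lst = [] then []
  else
    let s : List Char := PySem.Chars.join [] (lst.map PySem.Int.toChars)
    let parts : List (List Char) := PySem.Chars.splitOn s ['1']
    let length : Int := (parts.length : Int)
    if length = 1 then lst
    else
      let result : List Int := (PySem.List.enumerate parts).foldl
        (fun result ip =>
          let sub :=
            if ip.1 = 0 then get_sub_distance ip.2 true false
            else if ip.1 = length - 1 then get_sub_distance ip.2 false true
            else get_sub_distance ip.2 false false
          (result ++ sub) ++ [0]) []
      PySem.List.slice result none (some (-1))

-- ===== PORT B =====
def get_distance_to_the_closet_wall2_alt (lst : List Int) : List Int :=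
  let s : List Char := PySem.Chars.join [] (lst.map PySem.Int.toChars)
  if PySem.Chars.isIn ['1'] s = false then lst
  else
    let n : Int := (s.length : Int)
    let res : List Int := (s.foldl (fun (p : Int × List Int) c =>
        let d : Int := if c = '1' then 0 else p.1 + 1
        (d, p.2 ++ [d])) (n, [])).2
    let out : List Int := ((s.reverse.zip res.reverse).foldl (fun (p : Int × List Int) cr =>
        let d : Int := if cr.1 = '1' then 0 else p.1 + 1
        (d, p.2 ++ [min d cr.2])) (n, [])).2
    out.reverse

-- ===== PRECONDITION & SPEC =====
def Spec_get_distance_to_the_closet_wall2 (lst : List Int) (out : List Int) : Prop := out = get_distance_to_the_closet_wall2_alt lst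
instance (lst : List Int) (out : List Int) : Decidable (Spec_get_distance_to_the_closet_wall2 lst out) := by unfold Spec_get_distance_to_the_closet_wall2; infer_instance

-- ===== CLAIM (what is proved, stated in full; the proofs are below) =====
def Claim_equal_get_distance_to_the_closet_wall2 : Prop := ∀ (lst : List Int), Dom_get_distance_to_the_closet_wall2 lst → Spec_get_distance_to_the_closet_wall2 lst (get_distance_to_the_closet_wall2 lst)

-- ===== LEMMAS AND PROOFS =====

def pvF (d : Int) : List Char → List Int
  | [] => []
  | c :: r => (if c = '1' then 0 else d + 1) :: pvF (if c = '1' then 0 else d + 1) r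

def pvFst (d : Int) : List Char → Int
  | [] => d
  | c :: r => pvFst (if c = '1' then 0 else d + 1) r

def pvRamp (d : Int) (L : Nat) : List Int := (List.range L).map (fun i : Nat => d + (i : Int) + 1)

theorem pvRamp_succ (d : Int) (L : Nat) : pvRamp d (L + 1) = (d + 1) :: pvRamp (d + 1) L := by
  apply List.ext_getElem
  · simp [pvRamp]
  · intro i h1 h2
    rcases i with _ | i <;>
      simp only [pvRamp, List.getElem_map, List.getElem_range, List.getElem_cons_zero,
        List.getElem_cons_succ] <;> push_cast <;> ring

theorem pvF_length (d : Int) (cs : List Char) : (pvF d cs).length = cs.length := by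
  induction cs generalizing d with
  | nil => simp [pvF]
  | cons c r ih => simp [pvF, ih]

theorem pvF_append (d : Int) (xs ys : List Char) :
    pvF d (xs ++ ys) = pvF d xs ++ pvF (pvFst d xs) ys := by
  induction xs generalizing d with
  | nil => simp [pvF, pvFst]
  | cons c r ih => simp [pvF, pvFst, ih]

theorem pvF_free (d : Int) (p : List Char) (h : '1' ∉ p) : pvF d p = pvRamp d p.length := by
  induction p generalizing d with
  | nil => simp [pvF, pvRamp]
  | cons c r ih =>
    have hc : ¬ c = '1' := fun hh => h (by simp [hh])
    simp only [pvF, if_neg hc]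
    rw [ih (d + 1) (fun hh => h (List.mem_cons_of_mem _ hh))]
    rw [List.length_cons, pvRamp_succ]

def pvMapHead (f : List Char → List Char) : List (List Char) → List (List Char)
  | [] => []
  | p :: ps => f p :: ps

def pvSplit : List Char → List (List Char)
  | [] => [[]]
  | c :: r => if c = '1' then [] :: pvSplit r else pvMapHead (c :: ·) (pvSplit r)

theorem pvSplit_ne_nil (cs : List Char) : pvSplit cs ≠ [] := by
  induction cs with
  | nil => simp [pvSplit]
  | cons c r ih =>
    simp only [pvSplit]
    split
    · simp
    · cases h : pvSplit r with
      | nil => exact absurd h ih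
      | cons p ps => simp [pvMapHead]

theorem pvIc_cons (q : List Char) (rest : List (List Char)) (h : rest ≠ []) :
    ['1'].intercalate (q :: rest) = q ++ '1' :: ['1'].intercalate rest := by
  cases rest with
  | nil => exact absurd rfl h
  | cons r rs => simp [List.intercalate, List.intersperse]

theorem pvIc_singleton (q : List Char) : ['1'].intercalate [q] = q := by
  simp [List.intercalate]

theorem pvSplit_intercalate (cs : List Char) : ['1'].intercalate (pvSplit cs) = cs := by
  induction cs with
  | nil => simp [pvSplit, pvIc_singleton]
  | cons c r ih =>
    simp only [pvSplit]
    by_cases hc : c = '1'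
    · subst hc
      rw [if_pos rfl, pvIc_cons _ _ (pvSplit_ne_nil r)]
      simp [ih]
    · rw [if_neg hc]
      cases hs : pvSplit r with
      | nil => exact absurd hs (pvSplit_ne_nil r)
      | cons p ps =>
        rw [hs] at ih
        cases ps with
        | nil => simp [pvMapHead, pvIc_singleton] at ih ⊢; simp [ih]
        | cons p2 ps2 =>
          rw [pvIc_cons _ _ (by simp)] at ih
          simp only [pvMapHead]
          rw [pvIc_cons _ _ (by simp)]
          simp [← ih]

theorem pvSplit_free (cs : List Char) : ∀ p ∈ pvSplit cs, '1' ∉ p := by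
  induction cs with
  | nil => simp [pvSplit]
  | cons c r ih =>
    simp only [pvSplit]
    by_cases hc : c = '1'
    · rw [if_pos hc]; intro p hp
      rcases List.mem_cons.mp hp with h | h
      · subst h; simp
      · exact ih p h
    · rw [if_neg hc]
      cases hs : pvSplit r with
      | nil => exact absurd hs (pvSplit_ne_nil r)
      | cons p ps =>
        intro x hx
        rcases List.mem_cons.mp hx with h | h
        · subst h
          intro hmem
          rcases List.mem_cons.mp hmem with h1 | h1
          · exact hc h1.symm
          · exact ih p (by rw [hs]; exact List.mem_cons_self ..) h1
        · exact ih x (by rw [hs]; exact List.mem_cons_of_mem _ h)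

theorem pvSplit_length (cs : List Char) : (pvSplit cs).length = cs.count '1' + 1 := by
  induction cs with
  | nil => simp [pvSplit]
  | cons c r ih =>
    simp only [pvSplit]
    by_cases hc : c = '1'
    · rw [if_pos hc]; simp [List.count_cons, hc, ih]
    · rw [if_neg hc]
      cases hs : pvSplit r with
      | nil => exact absurd hs (pvSplit_ne_nil r)
      | cons p ps =>
        rw [hs] at ih
        simp only [pvMapHead, List.length_cons] at ih ⊢
        simp [List.count_cons, hc, ih]

theorem pvIc_mem_length_le (parts : List (List Char)) (p : List Char) (hp : p ∈ parts) :
    p.length ≤ (['1'].intercalate parts).length := by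
  induction parts with
  | nil => simp at hp
  | cons q rest ih =>
    cases rest with
    | nil => simp at hp; subst hp; simp [pvIc_singleton]
    | cons r rs =>
      rw [pvIc_cons _ _ (by simp)]
      rcases List.mem_cons.mp hp with h | h
      · subst h; simp
      · have := ih h
        simp only [List.length_append, List.length_cons]
        omega

theorem pvIc_append_singleton (A : List (List Char)) (x : List Char) (h : A ≠ []) :
    ['1'].intercalate (A ++ [x]) = ['1'].intercalate A ++ '1' :: x := by
  induction A with
  | nil => exact absurd rfl h
  | cons a A ih =>
    cases A with
    | nil => simp [pvIc_cons _ _ (by simp : ([x] : List (List Char)) ≠ []), pvIc_singleton]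
    | cons a2 A2 =>
      rw [List.cons_append, pvIc_cons a (a2 :: A2 ++ [x]) (by simp), ih (by simp),
        pvIc_cons a (a2 :: A2) (by simp)]
      simp

theorem pvIc_reverse (parts : List (List Char)) :
    (['1'].intercalate parts).reverse = ['1'].intercalate ((parts.reverse).map List.reverse) := by
  induction parts with
  | nil => simp [List.intercalate]
  | cons q rest ih =>
    cases rest with
    | nil => simp [pvIc_singleton]
    | cons r rs =>
      rw [pvIc_cons _ _ (by simp)]
      rw [show (q :: r :: rs).reverse = (r :: rs).reverse ++ [q] by simp]
      rw [List.map_append]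
      rw [show List.map List.reverse [q] = [q.reverse] from rfl]
      rw [pvIc_append_singleton _ _ (by simp)]
      rw [← ih]
      simp


theorem pvSplit_go (fuel : Nat) (l cur : List Char) (acc : List (List Char))
    (h : l.length ≤ fuel) :
    PySem.Chars.splitOn.go ['1'] fuel l cur acc
      = acc.reverse ++ pvMapHead (cur.reverse ++ ·) (pvSplit l) := by
  induction fuel generalizing l cur acc with
  | zero =>
    have : l = [] := by cases l <;> simp_all
    subst this
    simp [PySem.Chars.splitOn.go, pvSplit, pvMapHead]
  | succ fuel ih =>
    cases l with
    | nil => simp [PySem.Chars.splitOn.go, pvSplit, pvMapHead]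
    | cons c rest =>
      simp only [PySem.Chars.splitOn.go]
      by_cases hc : c = '1'
      · subst hc
        have hpre : List.isPrefixOf ['1'] ('1' :: rest) = true := by
          simp [List.isPrefixOf]
        rw [if_pos hpre]
        simp only [List.length_cons, List.length_nil, List.drop_succ_cons, List.drop_zero, Nat.zero_add]
        rw [ih rest [] (cur.reverse :: acc) (by simpa using Nat.le_of_succ_le_succ (by simpa using h))]
        cases hs : pvSplit rest with
        | nil => exact absurd hs (pvSplit_ne_nil rest)
        | cons p ps => simp [pvSplit, pvMapHead, hs]
      · have hpre : List.isPrefixOf ['1'] (c :: rest) = false := by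
          simp [List.isPrefixOf]; intro hh; exact absurd hh.symm hc
        rw [if_neg (by simp [hpre])]
        rw [ih rest (c :: cur) acc (by simpa using Nat.le_of_succ_le_succ (by simpa using h))]
        cases hs : pvSplit rest with
        | nil => exact absurd hs (pvSplit_ne_nil rest)
        | cons p ps => simp [pvSplit, pvMapHead, hs, hc]

theorem pvSplitOn_eq (cs : List Char) : PySem.Chars.splitOn cs ['1'] = pvSplit cs := by
  rw [PySem.Chars.splitOn, pvSplit_go (cs.length + 1) cs [] [] (by omega)]
  cases hs : pvSplit cs with
  | nil => exact absurd hs (pvSplit_ne_nil cs)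
  | cons p ps => simp [pvMapHead]

theorem pvF_wall (d : Int) (r : List Char) : pvF d ('1' :: r) = 0 :: pvF 0 r := by
  simp [pvF]

theorem pvF_mid (qs : List (List Char)) (pl : List Char)
    (hfree : ∀ q ∈ qs, '1' ∉ q) (hl : '1' ∉ pl) :
    pvF 0 (['1'].intercalate (qs ++ [pl]))
      = qs.flatMap (fun q => pvRamp 0 q.length ++ [0]) ++ pvRamp 0 pl.length := by
  induction qs with
  | nil => simp [pvIc_singleton, pvF_free 0 pl hl]
  | cons q qs ih =>
    rw [List.cons_append, pvIc_cons _ _ (by simp), pvF_append, pvF_wall,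
      pvF_free 0 q (hfree q (by simp)),
      ih (fun x hx => hfree x (List.mem_cons_of_mem _ hx)) ]
    simp

theorem pvFold_fwd (cs : List Char) (d : Int) (acc : List Int) :
    (cs.foldl (fun (p : Int × List Int) c =>
        (if c = '1' then 0 else p.1 + 1, p.2 ++ [if c = '1' then 0 else p.1 + 1])) (d, acc))
      = (pvFst d cs, acc ++ pvF d cs) := by
  induction cs generalizing d acc with
  | nil => simp [pvFst, pvF]
  | cons c r ih => simp [pvFst, pvF, ih]

theorem pvFold_bwd (cs : List Char) (rs : List Int) (d : Int) (acc : List Int)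
    (h : cs.length = rs.length) :
    (((cs.zip rs).foldl (fun (p : Int × List Int) cr =>
        (if cr.1 = '1' then 0 else p.1 + 1,
         p.2 ++ [min (if cr.1 = '1' then 0 else p.1 + 1) cr.2])) (d, acc))).2
      = acc ++ (pvF d cs).zipWith min rs := by
  induction cs generalizing rs d acc with
  | nil => simp [pvF]
  | cons c cr ih =>
    cases rs with
    | nil => simp at h
    | cons r rr =>
      simp only [List.zip_cons_cons, List.foldl_cons]
      rw [ih rr _ _ (by simpa using h)]
      simp [pvF]

theorem pvPyRange_up (m : Nat) :
    PySem.List.pyRange 1 ((m : Int) + 1) 1 = pvRamp 0 m := by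
  have hcount : (if (1:Int) < (m:Int) + 1 then ((((m:Int) + 1) - 1 + 1 - 1) / 1).toNat else 0) = m := by
    split <;> simp_all <;> omega
  simp only [PySem.List.pyRange, if_neg (by norm_num : ¬ (1:Int) = 0), if_pos (by norm_num : (0:Int) < 1)]
  rw [hcount]
  apply List.ext_getElem
  · simp [pvRamp]
  · intro i h1 h2
    simp [pvRamp]
    omega

theorem pvPyRange_down (m : Nat) :
    PySem.List.pyRange (m : Int) 0 (-1) = (pvRamp 0 m).reverse := by
  have hcount : (if (0:Int) < (m:Int) then (((m:Int) - 0 + -(-1) - 1) / -(-1)).toNat else 0) = m := by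
    split <;> simp_all <;> omega
  simp only [PySem.List.pyRange, if_neg (by norm_num : ¬ (-1:Int) = 0),
    if_neg (by norm_num : ¬ (0:Int) < -1)]
  rw [hcount]
  apply List.ext_getElem
  · simp [pvRamp]
  · intro i h1 h2
    simp only [List.getElem_map, List.getElem_range, List.getElem_reverse, pvRamp]
    simp at h1 ⊢
    omega

theorem pvGs_start (p : List Char) : get_sub_distance p true false = (pvRamp 0 p.length).reverse := by
  simp only [get_sub_distance, if_pos rfl]
  exact pvPyRange_down p.length

theorem pvGs_end (p : List Char) : get_sub_distance p false true = pvRamp 0 p.length := by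
  norm_num [get_sub_distance]
  exact pvPyRange_up p.length

theorem pvGs_mid (p : List Char) :
    get_sub_distance p false false
      = (pvRamp 0 p.length).zipWith min ((pvRamp 0 p.length).reverse) := by
  have hmid : PySem.Int.floordiv (p.length : Int) 2 = ((p.length / 2 : Nat) : Int) := by
    simp only [PySem.Int.floordiv]
    rw [Int.fdiv_eq_ediv]
    omega
  have hmod : PySem.Int.mod (p.length : Int) 2 = ((p.length % 2 : Nat) : Int) := by
    simp only [PySem.Int.mod]
    rw [Int.fmod_eq_emod]
    omega
  norm_num [get_sub_distance, hmid, hmod]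
  rw [show ((p.length : Int)) / 2 = ((p.length / 2 : Nat) : Int) by omega]
  rw [pvPyRange_up (p.length / 2)]
  by_cases hpar : p.length % 2 = 0
  · rw [if_pos (by omega : (2:Int) ∣ (p.length : Int))]
    apply List.ext_getElem
    · simp [pvRamp]; omega
    · intro i h1 h2
      simp only [pvRamp, List.getElem_append, List.getElem_reverse, List.getElem_zipWith,
        List.getElem_map, List.getElem_range, List.length_map, List.length_range,
        List.length_reverse]
      simp only [pvRamp, List.length_append, List.length_map, List.length_range,
        List.length_reverse, List.length_zipWith] at h1 h2
      split_ifs <;> omega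
  · rw [if_neg (by omega : ¬ (2:Int) ∣ (p.length : Int))]
    apply List.ext_getElem
    · simp [pvRamp]; omega
    · intro i h1 h2
      simp only [pvRamp, List.getElem_append, List.getElem_cons, List.getElem_reverse,
        List.getElem_zipWith, List.getElem_map, List.getElem_range, List.length_map,
        List.length_range, List.length_reverse]
      simp only [pvRamp, List.length_append, List.length_cons, List.length_map,
        List.length_range, List.length_reverse, List.length_zipWith] at h1 h2
      split_ifs <;> omega

theorem pvZip_block1 (a : Nat) (n : Int) (h : (a : Int) ≤ n) :
    (pvRamp n a).zipWith min ((pvRamp 0 a).reverse) = (pvRamp 0 a).reverse := by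
  apply List.ext_getElem
  · simp [pvRamp]
  · intro i h1 h2
    simp only [pvRamp, List.getElem_zipWith, List.getElem_reverse, List.getElem_map,
      List.getElem_range, List.length_map, List.length_range]
    simp only [pvRamp, List.length_zipWith, List.length_reverse, List.length_map,
      List.length_range] at h1 h2
    omega

theorem pvZip_block3 (b : Nat) (n : Int) (h : (b : Int) ≤ n) :
    (pvRamp 0 b).zipWith min ((pvRamp n b).reverse) = pvRamp 0 b := by
  apply List.ext_getElem
  · simp [pvRamp]
  · intro i h1 h2
    simp only [pvRamp, List.getElem_zipWith, List.getElem_reverse, List.getElem_map,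
      List.getElem_range, List.length_map, List.length_range]
    simp only [pvRamp, List.length_zipWith, List.length_reverse, List.length_map,
      List.length_range] at h1 h2
    omega

theorem pvZip_middle (qs : List (List Char)) :
    ((0 : Int) :: qs.flatMap (fun q => pvRamp 0 q.length ++ [0])).zipWith min
      (qs.flatMap (fun q => 0 :: (pvRamp 0 q.length).reverse) ++ [0])
    = 0 :: qs.flatMap (fun q => (pvRamp 0 q.length).zipWith min ((pvRamp 0 q.length).reverse) ++ [0]) := by
  induction qs with
  | nil => simp
  | cons q qs ih =>
    simp only [List.flatMap_cons]
    rw [show ((0 : Int) :: ((pvRamp 0 q.length ++ [0]) ++ qs.flatMap (fun q => pvRamp 0 q.length ++ [0])))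
          = ((0 : Int) :: pvRamp 0 q.length) ++ ((0 : Int) :: qs.flatMap (fun q => pvRamp 0 q.length ++ [0])) by simp]
    rw [show (((0 : Int) :: (pvRamp 0 q.length).reverse) ++ qs.flatMap (fun q => (0 : Int) :: (pvRamp 0 q.length).reverse)) ++ [(0 : Int)]
          = ((0 : Int) :: (pvRamp 0 q.length).reverse) ++ (qs.flatMap (fun q => (0 : Int) :: (pvRamp 0 q.length).reverse) ++ [(0 : Int)]) by simp]
    rw [List.zipWith_append (by simp [pvRamp])]
    rw [ih]
    simp [List.zipWith_cons_cons]

def pvTail : List (List Char) → List Int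
  | [] => []
  | [p] => get_sub_distance p false true ++ [0]
  | p :: ps => (get_sub_distance p false false ++ [0]) ++ pvTail ps

theorem pvEnumerate_cons {α : Type} (x : α) (t : List α) (j : Int) :
    PySem.List.enumerate (x :: t) j = (j, x) :: PySem.List.enumerate t (j + 1) := by
  simp [PySem.List.enumerate]

theorem pvLoopA (len : Int) (ps : List (List Char)) (j : Int) (acc : List Int)
    (hne : ps ≠ []) (hj : 1 ≤ j) (hlen : j + ps.length = len) :
    (PySem.List.enumerate ps j).foldl
      (fun result ip =>
        (result ++
          (if ip.1 = 0 then get_sub_distance ip.2 true false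
           else if ip.1 = len - 1 then get_sub_distance ip.2 false true
           else get_sub_distance ip.2 false false)) ++ [0]) acc
    = acc ++ pvTail ps := by
  induction ps generalizing j acc with
  | nil => exact absurd rfl hne
  | cons p ps ih =>
    rw [pvEnumerate_cons, List.foldl_cons]
    cases ps with
    | nil =>
      simp only [List.length_cons, List.length_nil] at hlen
      have hj0 : ¬ j = 0 := by omega
      have hjlast : j = len - 1 := by omega
      simp only [PySem.List.enumerate, List.foldl_nil, pvTail]
      simp only [if_neg hj0, if_pos hjlast]
      simp
    | cons p2 ps2 =>
      have hj0 : ¬ j = 0 := by omega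
      have hjlast : ¬ j = len - 1 := by
        simp only [List.length_cons] at hlen
        push_cast at hlen
        omega
      simp only [if_neg hj0, if_neg hjlast]
      rw [ih (j + 1) _ (by simp) (by omega) (by
        simp only [List.length_cons] at hlen ⊢
        push_cast at hlen ⊢
        omega)]
      show _ = acc ++ pvTail (p :: p2 :: ps2)
      simp only [pvTail]
      simp

theorem pvTail_flat (qs : List (List Char)) (pl : List Char) :
    pvTail (qs ++ [pl])
      = qs.flatMap (fun q => get_sub_distance q false false ++ [0])
        ++ (get_sub_distance pl false true ++ [0]) := by
  induction qs with
  | nil => simp [pvTail]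
  | cons q qs ih =>
    cases hq : qs ++ [pl] with
    | nil => simp at hq
    | cons x xs =>
      show pvTail (q :: qs ++ [pl]) = _
      rw [show q :: qs ++ [pl] = q :: (qs ++ [pl]) by simp, hq]
      simp only [pvTail, ← hq, ih]
      simp

theorem pvSlice_dropLast (X : List Int) :
    PySem.List.slice (X ++ [0]) none (some (-1)) = X := by
  simp only [PySem.List.slice, PySem.List.clampIdx]
  norm_num

theorem pvIsIn_singleton (c : Char) (s : List Char) :
    PySem.Chars.isIn [c] s = false ↔ c ∉ s := by
  rw [PySem.Chars.isIn_eq_false_iff]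
  constructor
  · intro h hmem
    rcases List.append_of_mem hmem with ⟨t1, t2, rfl⟩
    exact h ⟨t1, t2, by simp⟩
  · intro h hinf
    exact h (hinf.subset (by simp))


theorem pvFlat_rev' (qs : List (List Char)) :
    ((List.map List.reverse qs).reverse.flatMap (fun q => pvRamp 0 q.length ++ [0])).reverse
      = qs.flatMap (fun q => (0 : Int) :: (pvRamp 0 q.length).reverse) := by
  induction qs with
  | nil => simp
  | cons q qs ih =>
    simp only [List.map_cons, List.reverse_cons, List.flatMap_append, List.flatMap_cons,
      List.flatMap_nil, List.reverse_append, ih]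
    simp


theorem pvFwd_blocks (n : Int) (p0 pl : List Char) (qs : List (List Char))
    (hfree0 : '1' ∉ p0) (hfreeqs : ∀ q ∈ qs, '1' ∉ q) (hfreepl : '1' ∉ pl) :
    pvF n (['1'].intercalate (p0 :: (qs ++ [pl])))
      = pvRamp n p0.length
        ++ ((((0 : Int) :: qs.flatMap (fun q => pvRamp 0 q.length ++ [0])))
            ++ pvRamp 0 pl.length) := by
  rw [pvIc_cons _ _ (by simp), pvF_append, pvF_free _ p0 hfree0, pvF_wall,
    pvF_mid qs pl hfreeqs hfreepl]
  simp

theorem pvBwd_blocks (n : Int) (p0 pl : List Char) (qs : List (List Char))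
    (hfree0 : '1' ∉ p0) (hfreeqs : ∀ q ∈ qs, '1' ∉ q) (hfreepl : '1' ∉ pl) :
    (pvF n (['1'].intercalate (p0 :: (qs ++ [pl]))).reverse).reverse
      = (pvRamp 0 p0.length).reverse
        ++ ((qs.flatMap (fun q => (0 : Int) :: (pvRamp 0 q.length).reverse) ++ [0])
            ++ (pvRamp n pl.length).reverse) := by
  rw [pvIc_reverse, show ((p0 :: (qs ++ [pl])).reverse.map List.reverse)
        = pl.reverse :: ((qs.reverse.map List.reverse) ++ [p0.reverse]) by simp]
  rw [pvIc_cons _ _ (by simp), pvF_append, pvF_free _ pl.reverse (by simp [hfreepl]), pvF_wall]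
  rw [pvF_mid (qs.reverse.map List.reverse) p0.reverse
    (by
      intro q hq
      rw [List.mem_map] at hq
      obtain ⟨x, hx, rfl⟩ := hq
      rw [List.mem_reverse] at hx
      simp [hfreeqs x hx])
    (by simp [hfree0])]
  simp [pvFlat_rev']

theorem pvMain (cs : List Char) (h1 : '1' ∈ cs) :
    PySem.List.slice
      ((PySem.List.enumerate (pvSplit cs)).foldl
        (fun result ip =>
          let sub :=
            if ip.1 = 0 then get_sub_distance ip.2 true false
            else if ip.1 = ((pvSplit cs).length : Int) - 1 then get_sub_distance ip.2 false true
            else get_sub_distance ip.2 false false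
          (result ++ sub) ++ [0]) []) none (some (-1))
    = (pvF (cs.length : Int) cs).zipWith min ((pvF (cs.length : Int) cs.reverse).reverse) := by
  have hlen2 : 2 ≤ (pvSplit cs).length := by
    rw [pvSplit_length]
    have := List.count_pos_iff.mpr h1
    omega
  obtain ⟨p0, rest, hsplit⟩ : ∃ p0 rest, pvSplit cs = p0 :: rest := by
    cases h : pvSplit cs with
    | nil => exact absurd h (pvSplit_ne_nil cs)
    | cons p ps => exact ⟨p, ps, rfl⟩
  have hrest : rest ≠ [] := by
    intro h; rw [h] at hsplit; rw [hsplit] at hlen2; simp at hlen2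
  obtain ⟨qs, pl, hqs⟩ : ∃ qs pl, rest = qs ++ [pl] := by
    rcases List.eq_nil_or_concat rest with h | ⟨l, a, h⟩
    · exact absurd h hrest
    · exact ⟨l, a, by simpa using h⟩
  subst hqs
  have hic : ['1'].intercalate (p0 :: (qs ++ [pl])) = cs := by
    rw [← hsplit]; exact pvSplit_intercalate cs
  have hfree0 : '1' ∉ p0 := pvSplit_free cs p0 (by rw [hsplit]; exact List.mem_cons_self ..)
  have hfreepl : '1' ∉ pl := pvSplit_free cs pl (by rw [hsplit]; simp)
  have hfreeqs : ∀ q ∈ qs, '1' ∉ q := fun q hq =>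
    pvSplit_free cs q (by rw [hsplit]; simp [hq])
  have ha : (p0.length : Int) ≤ (cs.length : Int) := by
    have := pvIc_mem_length_le (p0 :: (qs ++ [pl])) p0 (List.mem_cons_self ..)
    rw [hic] at this; exact_mod_cast this
  have hb : (pl.length : Int) ≤ (cs.length : Int) := by
    have := pvIc_mem_length_le (p0 :: (qs ++ [pl])) pl (by simp)
    rw [hic] at this; exact_mod_cast this
  subst hic
  -- A side
  rw [hsplit, pvEnumerate_cons, List.foldl_cons]
  simp only [if_true, zero_add]
  rw [pvLoopA (((p0 :: (qs ++ [pl])).length : Int)) (qs ++ [pl]) 1 _ (by simp) (by omega)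
    (by push_cast; simp; ring)]
  rw [pvTail_flat]
  simp only [pvGs_start, pvGs_mid, pvGs_end]
  rw [show ([] ++ (pvRamp 0 p0.length).reverse) ++ [(0:Int)]
        ++ (qs.flatMap (fun q => (pvRamp 0 q.length).zipWith min ((pvRamp 0 q.length).reverse) ++ [0])
            ++ (pvRamp 0 pl.length ++ [0]))
      = ((pvRamp 0 p0.length).reverse ++ (((0:Int)
          :: qs.flatMap (fun q => (pvRamp 0 q.length).zipWith min ((pvRamp 0 q.length).reverse) ++ [0]))
          ++ pvRamp 0 pl.length)) ++ [0] by simp]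
  rw [pvSlice_dropLast]
  -- B side
  rw [pvFwd_blocks _ p0 pl qs hfree0 hfreeqs hfreepl,
    pvBwd_blocks _ p0 pl qs hfree0 hfreeqs hfreepl]
  rw [List.zipWith_append (by simp [pvRamp])]
  rw [List.zipWith_append (by simp [pvRamp])]
  rw [pvZip_block1 p0.length _ ha, pvZip_middle qs, pvZip_block3 pl.length _ hb]

-- ===== VERDICT (by name: the statement is the Claim_ definition above) =====
theorem get_distance_to_the_closet_wall2_spec : Claim_equal_get_distance_to_the_closet_wall2 := by
  intro lst _
  unfold Spec_get_distance_to_the_closet_wall2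
  unfold get_distance_to_the_closet_wall2 get_distance_to_the_closet_wall2_alt
  by_cases hnil : lst = []
  case pos => subst hnil; rfl
  case neg =>
  rw [if_neg hnil]
  simp only []
  generalize PySem.Chars.join [] (lst.map PySem.Int.toChars) = cs
  by_cases hmem : '1' ∈ cs
  case neg =>
    have h1 : ((PySem.Chars.splitOn cs ['1']).length : Int) = 1 := by
      rw [pvSplitOn_eq, pvSplit_length, List.count_eq_zero.mpr hmem]
      simp
    rw [if_pos h1, if_pos ((pvIsIn_singleton '1' cs).mpr hmem)]
  case pos =>
    have hfalse : ¬ (PySem.Chars.isIn ['1'] cs = false) := fun h =>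
      ((pvIsIn_singleton '1' cs).mp h) hmem
    have hne1 : ¬ ((PySem.Chars.splitOn cs ['1']).length : Int) = 1 := by
      rw [pvSplitOn_eq, pvSplit_length]
      have := List.count_pos_iff.mpr hmem
      push_cast
      omega
    rw [if_neg hne1, if_neg hfalse, pvSplitOn_eq]
    rw [pvFold_fwd cs ((cs.length : Int)) []]
    simp only [List.nil_append]
    rw [pvFold_bwd cs.reverse ((pvF ((cs.length : Int)) cs).reverse) ((cs.length : Int)) []
      (by simp [pvF_length])]
    simp only [List.nil_append]
    rw [List.reverse_zipWith (by simp [pvF_length])]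
    rw [List.reverse_reverse]
    rw [List.zipWith_comm_of_comm min_comm]
    exact pvMain cs hmem
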